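-- pv_equiv track=rewrite | github.com/remr2005/DataAnalys1lab | fibonachi.py | find_in_fibonachi
-- ===== SOURCE A (Python) =====
-- def FibSums(n: int):
--     sum = 0
--     fr = 0
--     sc = 1
--     for i in range(n):
--         if i == 0:
--             yield 0
--         else:
--             sum += fr
--             yield sum
--         fr, sc = sc, fr + sc
--
-- def find_in_fibonachi(n: int):
--     j = 0
--     fib_gen = FibSums(n)
--     while True:
--         i = next(fib_gen)
--         if len(str(i)) > len(str(n)):
--             return j
--         j += 1
-- ===== SOURCE B (Python) =====
-- def find_in_fibonachi(n: int):
--     # The j-th cumulative Fibonacci sum is F(j+2) - 1, so one Fibonacci pair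
--     # replaces the generator, the running sum and the i == 0 special case.
--     L = len(str(n))
--     a, b = 1, 1
--     for j in range(n):
--         if len(str(b - 1)) > L:
--             return j
--         a, b = b, a + b
--     raise StopIteration
-- ===== Notes on version B (the rewrite author's own statement) =====
-- stated objective: simpler
-- what changed: Replaces the generator-plus-consumer with running cumulative sum and i==0 special case by one flat loop over a single Fibonacci pair, using the identity that the j-th cumulative Fibonacci sum equals F(j+2)-1, with len(str(n)) computed once.
import Mathlib
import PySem

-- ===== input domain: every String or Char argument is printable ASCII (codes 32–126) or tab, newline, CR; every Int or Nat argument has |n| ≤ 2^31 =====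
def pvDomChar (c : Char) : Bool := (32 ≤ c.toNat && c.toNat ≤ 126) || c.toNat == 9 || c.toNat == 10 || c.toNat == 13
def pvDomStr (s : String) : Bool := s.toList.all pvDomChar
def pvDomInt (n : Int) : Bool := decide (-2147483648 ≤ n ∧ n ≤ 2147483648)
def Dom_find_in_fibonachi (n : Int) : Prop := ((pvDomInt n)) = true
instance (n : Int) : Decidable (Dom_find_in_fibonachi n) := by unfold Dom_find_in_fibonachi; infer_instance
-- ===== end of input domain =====

-- B replaces A's generator + running-sum consumer by one flat loop over a single
-- Fibonacci pair (the j-th cumulative Fibonacci sum is F(j+2)-1): simpler decomposition.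


-- ===== PORT A =====
-- the generator FibSums is inlined into its only consumer (generators have no direct
-- Lean counterpart); state (sum, fr, sc) and the branch on i == 0 are A's, i doubles
-- as A's j (they are always equal); fuel = n.toNat = number of values range(n) yields;
-- fuel 0 = the generator is exhausted = Python raises StopIteration (excluded by Pre_)
def fibA (n : Int) : Nat → Int → Int → Int → Int → Int
  | 0, _, _, _, _ => 0
  | f + 1, sum, fr, sc, i =>
    if i == 0 then
      if (PySem.Int.toStr 0).length > (PySem.Int.toStr n).length then i
      else fibA n f sum sc (fr + sc) (i + 1)
    else
      let s := sum + fr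
      if (PySem.Int.toStr s).length > (PySem.Int.toStr n).length then i
      else fibA n f s sc (fr + sc) (i + 1)

def find_in_fibonachi (n : Int) : Int := fibA n n.toNat 0 0 1 0

-- ===== PORT B =====
def fibB (L : Nat) : Nat → Int → Int → Int → Int
  | 0, _, _, _ => 0
  | f + 1, a, b, j =>
    if (PySem.Int.toStr (b - 1)).length > L then j
    else fibB L f b (a + b) (j + 1)

def find_in_fibonachi_alt (n : Int) : Int :=
  fibB (PySem.Int.toStr n).length n.toNat 1 1 0

-- ===== PRECONDITION & SPEC =====
-- Pre_ excludes exactly the n on which Python's A raises StopIteration (the generator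
-- yields only n values and none of them has more digits than n): n ≤ 5 and n = 10.
def Pre_find_in_fibonachi (n : Int) : Prop := 6 ≤ n ∧ n ≠ 10
instance (n : Int) : Decidable (Pre_find_in_fibonachi n) := by unfold Pre_find_in_fibonachi; infer_instance
def pvWitness_find_in_fibonachi : Int := 6

def Spec_find_in_fibonachi (n : Int) (out : Int) : Prop := out = find_in_fibonachi_alt n
instance (n : Int) (out : Int) : Decidable (Spec_find_in_fibonachi n out) := by unfold Spec_find_in_fibonachi; infer_instance

-- ===== CLAIM (what is proved, stated in full; the proofs are below) =====
def Claim_equal_find_in_fibonachi : Prop := ∀ (n : Int), Dom_find_in_fibonachi n → Pre_find_in_fibonachi n → Spec_find_in_fibonachi n (find_in_fibonachi n)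

-- ===== LEMMAS AND PROOFS =====
-- Invariant: A's state (sum, fr, sc) at step i is (a-1, b-a, a) for B's pair (a, b),
-- and the value A yields at step i is b - 1 (at i = 0 both are 0 since b = 1).
lemma fib_loop_eq (n : Int) : ∀ (f : Nat) (a b i : Int), 0 ≤ i → (i = 0 → a = 1 ∧ b = 1) →
    fibA n f (a - 1) (b - a) a i = fibB (PySem.Int.toStr n).length f a b i := by
  intro f
  induction f with
  | zero => intro a b i _ _; rfl
  | succ f ih =>
    intro a b i hi h0
    by_cases hiz : i = 0
    · subst hiz
      obtain ⟨ha, hb⟩ := h0 rfl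
      subst ha; subst hb
      simp only [fibA, fibB]
      norm_num
      split
      · rfl
      · have := ih 1 2 1 (by norm_num) (by intro h; norm_num at h)
        norm_num at this ⊢
        exact this
    · have hbeq : (i == 0) = false := by simp [hiz]
      simp only [fibA, fibB, hbeq, Bool.false_eq_true, if_false]
      have e1 : a - 1 + (b - a) = b - 1 := by ring
      rw [e1]
      split
      · rfl
      · have hnz : i + 1 ≠ 0 := by omega
        have := ih b (a + b) (i + 1) (by omega) (fun h => absurd h hnz)
        have e3 : b - a + a = b := by ring
        rw [e3]
        have e2 : a + b - b = a := by ring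
        rw [e2] at this
        exact this

-- ===== VERDICT (by name: the statement is the Claim_ definition above) =====
theorem find_in_fibonachi_spec : Claim_equal_find_in_fibonachi := by
  intro n _ _
  show find_in_fibonachi n = find_in_fibonachi_alt n
  unfold find_in_fibonachi find_in_fibonachi_alt
  have := fib_loop_eq n n.toNat 1 1 0 le_rfl (fun _ => ⟨rfl, rfl⟩)
  norm_num at this
  exact this
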